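-- pv_equiv track=rewrite | github.com/yury-fedorov/AoC | AoC24/python/day09.py | _defrag
-- ===== SOURCE A (Python) =====
-- EMPTY_SPACE = -1
--
-- def _defrag(disk_map: {}):
--     '''Defragmentation for the answer 1 (fragmented files, empty space at the end is continuous).'''
--     disk_end = max(disk_map.keys())
--     position = disk_end
--     low_bound_empty = 0  # before it there is no free space
--     while position >= 0:
--         content = disk_map[position]
--         is_file = content != EMPTY_SPACE
--         if is_file:
--             # let's find empty space
--             while low_bound_empty < position:
--                 if disk_map[low_bound_empty] == EMPTY_SPACE:
--                     # found!
--                     disk_map[low_bound_empty] = content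
--                     disk_map[position] = EMPTY_SPACE
--                     break
--                 else:
--                     # not found, let's move bound ahead
--                     low_bound_empty += 1
--         position -= 1
--     return disk_map
-- ===== SOURCE B (Python) =====
-- EMPTY_SPACE = -1
--
-- def _defrag(disk_map: {}):
--     '''Defragmentation: pair empty slots (ascending) with file blocks (descending) until they cross.'''
--     disk_end = max(disk_map.keys())
--     empties = []
--     files = []
--     for pos in range(disk_end + 1):
--         content = disk_map[pos]
--         if content == EMPTY_SPACE:
--             empties.append(pos)
--         else:
--             files.append((pos, content))
--     files.reverse()
--     i = 0
--     while i < len(empties) and i < len(files) and empties[i] < files[i][0]: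
--         disk_map[empties[i]] = files[i][1]
--         disk_map[files[i][0]] = EMPTY_SPACE
--         i += 1
--     return disk_map
-- ===== Notes on version B (the rewrite author's own statement) =====
-- stated objective: alternative
-- what changed: A rescans for free space with a nested forward search inside a downward scan over positions; B makes one pass collecting empty positions (ascending) and file blocks (descending) and then pairs them index by index until they cross.
import Mathlib
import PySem

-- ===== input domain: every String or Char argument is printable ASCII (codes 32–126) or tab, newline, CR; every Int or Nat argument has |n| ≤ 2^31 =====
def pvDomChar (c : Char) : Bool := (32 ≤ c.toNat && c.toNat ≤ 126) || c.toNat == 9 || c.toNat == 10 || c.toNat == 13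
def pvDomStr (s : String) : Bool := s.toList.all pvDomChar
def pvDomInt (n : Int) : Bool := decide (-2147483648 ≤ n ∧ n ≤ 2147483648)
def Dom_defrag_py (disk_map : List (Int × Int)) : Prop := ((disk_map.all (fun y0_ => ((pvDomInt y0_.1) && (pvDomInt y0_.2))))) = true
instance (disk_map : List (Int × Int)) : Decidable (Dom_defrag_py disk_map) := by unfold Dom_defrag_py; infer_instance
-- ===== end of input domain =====

-- B pairs the ascending list of empty slots with the descending list of file blocks in one
-- pass instead of A's nested free-space rescan ("alternative" objective, same cost).
-- Both Pythons mutate the argument dict in place and return it; the equivalence proved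
-- here is about the returned dict (identical to the mutation both perform).

-- ===== PORT A =====
-- inner `while low_bound_empty < position` loop; returns (dict, low_bound_empty)
def defragInner (d : PySem.Dict Int Int) (low position content : Int) :
    PySem.Dict Int Int × Int :=
  if _h : low < position then
    if d.getD low 0 = -1 then
      ((d.insert low content).insert position (-1), low)
    else
      defragInner d (low + 1) position content
  else (d, low)
termination_by (position - low).toNat
decreasing_by omega

-- outer `while position >= 0` loop; fuel n means position = n-1, n-2, …, 0
def defragOuter (d : PySem.Dict Int Int) (low : Int) : Nat → PySem.Dict Int Int
  | 0 => d
  | n + 1 =>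
    let position : Int := (n : Int)
    let content := d.getD position 0
    if content ≠ -1 then
      let r := defragInner d low position content
      defragOuter r.1 r.2 n
    else
      defragOuter d low n

def defrag_py (disk_map : List (Int × Int)) : List (Int × Int) :=
  let d : PySem.Dict Int Int := ⟨disk_map⟩
  -- max(disk_map.keys()); the empty dict (ValueError) is excluded by Pre_
  let disk_end := (PySem.List.max? d.keys (fun x => x)).getD 0
  (defragOuter d 0 (disk_end + 1).toNat).items

-- ===== PORT B =====
-- `while i < len(empties) and i < len(files) and empties[i] < files[i][0]` loop
def defragPair (d : PySem.Dict Int Int) : List Int → List (Int × Int) → PySem.Dict Int Int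
  | [], _ => d
  | _ :: _, [] => d
  | p :: es, (fp, fc) :: fs =>
    if p < fp then defragPair ((d.insert p fc).insert fp (-1)) es fs
    else d

def defrag_py_alt (disk_map : List (Int × Int)) : List (Int × Int) :=
  let d : PySem.Dict Int Int := ⟨disk_map⟩
  let disk_end := (PySem.List.max? d.keys (fun x => x)).getD 0
  let scan := (PySem.List.pyRange 0 (disk_end + 1) 1).foldl
      (fun (acc : List Int × List (Int × Int)) pos =>
        let content := d.getD pos 0
        if content = -1 then (acc.1 ++ [pos], acc.2)
        else (acc.1, acc.2 ++ [(pos, content)]))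
      ([], [])
  (defragPair d scan.1 scan.2.reverse).items

-- ===== PRECONDITION & SPEC =====
-- Pre_ excludes exactly the inputs where the Python raises: the empty dict (ValueError from
-- max) and dicts missing some position in 0..max(keys) (KeyError on reading it).
def Pre_defrag_py (disk_map : List (Int × Int)) : Prop :=
  disk_map ≠ [] ∧
    ∀ i ∈ List.range ((PySem.List.max? (PySem.Dict.keys ⟨disk_map⟩) (fun x => x)).getD 0 + 1).toNat,
      PySem.Dict.contains (⟨disk_map⟩ : PySem.Dict Int Int) (i : Int) = true
instance (disk_map : List (Int × Int)) : Decidable (Pre_defrag_py disk_map) := by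
  unfold Pre_defrag_py; infer_instance

def pvWitness_defrag_py : (List (Int × Int)) := [(0, 1), (1, -1), (2, 2)]

def Spec_defrag_py (disk_map : List (Int × Int)) (out : List (Int × Int)) : Prop := out = defrag_py_alt disk_map
instance (disk_map : List (Int × Int)) (out : List (Int × Int)) : Decidable (Spec_defrag_py disk_map out) := by unfold Spec_defrag_py; infer_instance

-- ===== CLAIM (what is proved, stated in full; the proofs are below) =====
def Claim_equal_defrag_py : Prop := ∀ (disk_map : List (Int × Int)), Dom_defrag_py disk_map → Pre_defrag_py disk_map → Spec_defrag_py disk_map (defrag_py disk_map)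

-- ===== LEMMAS AND PROOFS =====

-- empty positions p with low ≤ p < n of d, ascending
def eOf (d : PySem.Dict Int Int) (low : Int) : Nat → List Int
  | 0 => []
  | n + 1 => eOf d low n ++ (if low ≤ (n : Int) ∧ d.getD (n : Int) 0 = -1 then [(n : Int)] else [])

-- file blocks (p, content) with 0 ≤ p < n of d, ascending
def fAsc (d : PySem.Dict Int Int) : Nat → List (Int × Int)
  | 0 => []
  | n + 1 => fAsc d n ++ (if d.getD (n : Int) 0 = -1 then [] else [((n : Int), d.getD (n : Int) 0)])

theorem mem_eOf {d : PySem.Dict Int Int} {low : Int} {n : Nat} {p : Int}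
    (h : p ∈ eOf d low n) : low ≤ p ∧ 0 ≤ p ∧ p < (n : Int) ∧ d.getD p 0 = -1 := by
  induction n with
  | zero => simp [eOf] at h
  | succ n ih =>
    simp only [eOf, List.mem_append] at h
    rcases h with h | h
    · have := ih h; refine ⟨this.1, this.2.1, by push_cast; omega, this.2.2.2⟩
    · split at h
      · rename_i hc
        simp only [List.mem_singleton] at h
        subst h
        exact ⟨hc.1, by positivity, by push_cast; omega, hc.2⟩
      · simp at h

theorem mem_fAsc {d : PySem.Dict Int Int} {n : Nat} {f : Int × Int}
    (h : f ∈ fAsc d n) : 0 ≤ f.1 ∧ f.1 < (n : Int) := by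
  induction n with
  | zero => simp [fAsc] at h
  | succ n ih =>
    simp only [fAsc, List.mem_append] at h
    rcases h with h | h
    · have := ih h; push_cast; omega
    · split at h
      · simp at h
      · simp only [List.mem_singleton] at h
        subst h
        exact ⟨by positivity, by push_cast; omega⟩

theorem eOf_nil_iff (d : PySem.Dict Int Int) (low : Int) (n : Nat) :
    eOf d low n = [] ↔ ∀ p : Int, low ≤ p → 0 ≤ p → p < (n : Int) → d.getD p 0 ≠ -1 := by
  induction n with
  | zero =>
    simp only [eOf, true_iff]
    intro p _ h1 h2
    omega
  | succ n ih =>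
    rw [eOf, List.append_eq_nil_iff, ih]
    constructor
    · rintro ⟨h1, h2⟩ p hlp h0p hpn
      by_cases hp : p < (n : Int)
      · exact h1 p hlp h0p hp
      · have hpe : p = (n : Int) := by push_cast at hpn ⊢; omega
        subst hpe
        intro hcon
        simp [hlp, hcon] at h2
    · intro h
      refine ⟨fun p hlp h0p hpn => h p hlp h0p (by push_cast; omega), ?_⟩
      split
      · rename_i hc
        exact absurd hc.2 (h _ hc.1 (by positivity) (by push_cast; omega))
      · rfl

theorem eOf_cons {d : PySem.Dict Int Int} {low : Int} {n : Nat} {e : Int} {E : List Int}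
    (h : eOf d low n = e :: E) :
    low ≤ e ∧ 0 ≤ e ∧ e < (n : Int) ∧ d.getD e 0 = -1 ∧
      (∀ p : Int, low ≤ p → 0 ≤ p → p < e → d.getD p 0 ≠ -1) ∧ E = eOf d (e + 1) n := by
  induction n generalizing E with
  | zero => simp [eOf] at h
  | succ n ih =>
    rw [eOf] at h
    rcases h0 : eOf d low n with _ | ⟨e', E'⟩
    · rw [h0, List.nil_append] at h
      split at h
      · rename_i hc
        cases h
        have hall := (eOf_nil_iff d low n).mp h0
        refine ⟨hc.1, by positivity, by push_cast; omega, hc.2, hall, ?_⟩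
        rw [eOf]
        have hnil : eOf d ((n : Int) + 1) n = [] := by
          rw [eOf_nil_iff]
          intro p h1 _ h2
          omega
        rw [hnil]
        simp
      · cases h
    · rw [h0] at h
      obtain ⟨rfl, rfl⟩ : e = e' ∧ E = E' ++ (if low ≤ (n : Int) ∧ d.getD (n : Int) 0 = -1 then [(n : Int)] else []) := by
        cases h; exact ⟨rfl, rfl⟩
      obtain ⟨h1, h2, h3, h4, h5, h6⟩ := ih h0
      refine ⟨h1, h2, by push_cast; omega, h4, h5, ?_⟩
      rw [eOf, ← h6]
      congr 1
      have ha : low ≤ (n : Int) := by omega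
      have hb : e + 1 ≤ (n : Int) := by omega
      simp only [ha, hb, true_and]

theorem eOf_ext {d d' : PySem.Dict Int Int} {low low' : Int} {n : Nat}
    (h : ∀ i : Nat, i < n →
      ((low ≤ (i : Int) ∧ d.getD (i : Int) 0 = -1) ↔ (low' ≤ (i : Int) ∧ d'.getD (i : Int) 0 = -1))) :
    eOf d low n = eOf d' low' n := by
  induction n with
  | zero => rfl
  | succ n ih =>
    rw [eOf, eOf, ih (fun i hi => h i (by omega))]
    congr 1
    have hn := h n (by omega)
    by_cases a : low' ≤ (n : Int) ∧ d'.getD (n : Int) 0 = -1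
    · rw [if_pos (hn.mpr a), if_pos a]
    · rw [if_neg (fun b => a (hn.mp b)), if_neg a]

theorem fAsc_ext {d d' : PySem.Dict Int Int} {n : Nat}
    (h : ∀ i : Nat, i < n → d.getD (i : Int) 0 = d'.getD (i : Int) 0) :
    fAsc d n = fAsc d' n := by
  induction n with
  | zero => rfl
  | succ n ih =>
    rw [fAsc, fAsc, ih (fun i hi => h i (by omega)), h n (by omega)]

-- the dict after moving content c into empty slot e splits the ascending file list around (e, c)
theorem fAsc_update {d d' : PySem.Dict Int Int} {e c : Int} (n : Nat)
    (h0 : 0 ≤ e) (hn : e < (n : Int)) (he : d.getD e 0 = -1) (hc : c ≠ -1)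
    (hd' : ∀ p : Int, 0 ≤ p → p < (n : Int) → d'.getD p 0 = if p = e then c else d.getD p 0) :
    ∃ A B, fAsc d n = A ++ B ∧ fAsc d' n = A ++ (e, c) :: B ∧ ∀ f ∈ A, f.1 < e := by
  induction n with
  | zero => omega
  | succ n ih =>
    by_cases hce : e = (n : Int)
    · refine ⟨fAsc d n, [], ?_, ?_, ?_⟩
      · rw [fAsc]
        subst hce
        simp [he]
      · rw [fAsc]
        have hsame : fAsc d' n = fAsc d n := by
          apply fAsc_ext
          intro i hi
          rw [hd' (i : Int) (by positivity) (by push_cast; omega)]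
          rw [if_neg (by omega)]
        have hgn : d'.getD (n : Int) 0 = c := by
          rw [hd' (n : Int) (by positivity) (by push_cast; omega), if_pos hce.symm]
        rw [hsame, hgn, if_neg hc, hce]
      · intro f hf
        have := mem_fAsc hf
        omega
    · have hen : e < (n : Int) := by push_cast at hn; omega
      obtain ⟨A, B, hAB, hAB', hA⟩ :=
        ih hen (fun p hp1 hp2 => hd' p hp1 (by push_cast; omega))
      have hgn : d'.getD (n : Int) 0 = d.getD (n : Int) 0 := by
        rw [hd' (n : Int) (by positivity) (by push_cast; omega), if_neg (fun hh => hce hh.symm)]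
      refine ⟨A, B ++ (if d.getD (n : Int) 0 = -1 then [] else [((n : Int), d.getD (n : Int) 0)]), ?_, ?_, hA⟩
      · rw [fAsc, hAB, List.append_assoc]
      · rw [fAsc, hAB', hgn]
        simp

-- B's pair loop ignores empty slots at or beyond every remaining file position
theorem pair_drop_empties (E : List Int) : ∀ (F : List (Int × Int)) (d : PySem.Dict Int Int)
    (E₂ : List Int), (∀ p ∈ E₂, ∀ f ∈ F, ¬ (p < f.1)) →
    defragPair d (E ++ E₂) F = defragPair d E F := by
  induction E with
  | nil =>
    intro F d E₂ h
    rcases E₂ with _ | ⟨p, E₂⟩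
    · rfl
    · rcases F with _ | ⟨⟨fp, fc⟩, F⟩
      · rfl
      · simp only [List.nil_append, defragPair]
        rw [if_neg (h p (by simp) (fp, fc) (by simp))]
  | cons p E ih =>
    intro F d E₂ h
    rcases F with _ | ⟨⟨fp, fc⟩, F⟩
    · rfl
    · simp only [List.cons_append, defragPair]
      split
      · exact ih F _ E₂ (fun q hq f hf => h q hq f (List.mem_cons_of_mem _ hf))
      · rfl

-- a file block at a position ≤ every remaining empty slot may be removed from the middle
theorem pair_skip_mid {e c : Int} (A : List (Int × Int)) :
    ∀ (d : PySem.Dict Int Int) (E : List Int) (B : List (Int × Int)),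
    (∀ p ∈ E, ¬ (p < e)) → (∀ f ∈ B, f.1 ≤ e) →
    defragPair d E (A ++ (e, c) :: B) = defragPair d E (A ++ B) := by
  induction A with
  | nil =>
    intro d E B hE hB
    rcases E with _ | ⟨p, E⟩
    · rcases B with _ | b <;> rfl
    · simp only [List.nil_append, defragPair]
      rw [if_neg (hE p (by simp))]
      rcases B with _ | ⟨⟨fp, fc⟩, B⟩
      · rfl
      · simp only [defragPair]
        rw [if_neg (by have h1 := hB (fp, fc) (by simp); have h2 := hE p (by simp); simp at h1 h2 ⊢; omega)]
  | cons a A ih =>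
    intro d E B hE hB
    obtain ⟨ap, ac⟩ := a
    rcases E with _ | ⟨p, E⟩
    · rfl
    · simp only [List.cons_append, defragPair]
      split
      · exact ih _ E B (fun q hq => hE q (List.mem_cons_of_mem _ hq)) hB
      · rfl

-- the inner scan when no empty slot exists in [low, n)
theorem inner_none (n : Nat) (d : PySem.Dict Int Int) (low c : Int) (h0 : 0 ≤ low)
    (hall : ∀ p : Int, low ≤ p → p < (n : Int) → d.getD p 0 ≠ -1) :
    defragInner d low (n : Int) c = (d, if low < (n : Int) then (n : Int) else low) := by
  by_cases hlt : low < (n : Int)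
  · have hmain : ∀ (k : Nat) (low : Int), 0 ≤ low → ((n : Int) - low).toNat = k →
        low < (n : Int) →
        (∀ p : Int, low ≤ p → p < (n : Int) → d.getD p 0 ≠ -1) →
        defragInner d low (n : Int) c = (d, (n : Int)) := by
      intro k
      induction k with
      | zero => intro low _ hk hlow _; omega
      | succ k ih =>
        intro low hl0 hk hlow hall'
        rw [defragInner, dif_pos hlow, if_neg (hall' low le_rfl hlow)]
        by_cases h2 : low + 1 < (n : Int)
        · exact ih (low + 1) (by omega) (by omega) h2 (fun p hp => hall' p (by omega))
        · have hle : low + 1 = (n : Int) := by omega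
          rw [defragInner, dif_neg (by omega), hle]
    rw [if_pos hlt]
    exact hmain ((n : Int) - low).toNat low h0 rfl hlt hall
  · rw [if_neg hlt, defragInner, dif_neg hlt]

-- the inner scan when e is the first empty slot in [low, n)
theorem inner_found (n : Nat) (d : PySem.Dict Int Int) (c e : Int) :
    ∀ (low : Int), 0 ≤ low → low ≤ e → e < (n : Int) → d.getD e 0 = -1 →
    (∀ p : Int, low ≤ p → p < e → d.getD p 0 ≠ -1) →
    defragInner d low (n : Int) c = ((d.insert e c).insert (n : Int) (-1), e) := by
  have hmain : ∀ (k : Nat) (low : Int), 0 ≤ low → (e - low).toNat = k →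
      low ≤ e → e < (n : Int) → d.getD e 0 = -1 →
      (∀ p : Int, low ≤ p → p < e → d.getD p 0 ≠ -1) →
      defragInner d low (n : Int) c = ((d.insert e c).insert (n : Int) (-1), e) := by
    intro k
    induction k with
    | zero =>
      intro low _ hk hle hen hemp _
      have hfe : low = e := by omega
      subst hfe
      rw [defragInner, dif_pos (by omega), if_pos hemp]
    | succ k ih =>
      intro low hl0 hk hle hen hemp hall
      have hlt : low < e := by omega
      rw [defragInner, dif_pos (by omega), if_neg (hall low le_rfl hlt)]
      exact ih (low + 1) (by omega) (by omega) (by omega) hen hemp (fun p hp => hall p (by omega))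
  exact fun low hl0 => hmain (e - low).toNat low hl0 rfl

-- main invariant: A's remaining outer loop equals B's pairing of the remaining
-- empty slots (from low up) with all the file blocks below n, descending
theorem outer_eq_pair (n : Nat) : ∀ (d : PySem.Dict Int Int) (low : Int), 0 ≤ low →
    defragOuter d low n = defragPair d (eOf d low n) (fAsc d n).reverse := by
  induction n with
  | zero =>
    intro d low _
    rfl
  | succ n ih =>
    intro d low hlow
    have hstep : defragOuter d low (n + 1)
        = if d.getD (n : Int) 0 ≠ -1 then
            defragOuter (defragInner d low (n : Int) (d.getD (n : Int) 0)).1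
              (defragInner d low (n : Int) (d.getD (n : Int) 0)).2 n
          else defragOuter d low n := rfl
    rw [hstep]
    by_cases hc : d.getD (n : Int) 0 = -1
    · -- position n is empty: A skips it; B never pairs it (all files are below n)
      rw [if_neg (not_not_intro hc), ih d low hlow]
      have hE : eOf d low (n + 1) = eOf d low n ++ (if low ≤ (n : Int) then [(n : Int)] else []) := by
        rw [eOf]
        congr 1
        by_cases hl : low ≤ (n : Int)
        · rw [if_pos ⟨hl, hc⟩, if_pos hl]
        · rw [if_neg (fun a => hl a.1), if_neg hl]
      have hF : fAsc d (n + 1) = fAsc d n := by rw [fAsc, if_pos hc]; simp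
      rw [hE, hF]
      by_cases hl : low ≤ (n : Int)
      · rw [if_pos hl,
          pair_drop_empties (eOf d low n) ((fAsc d n).reverse) d [(n : Int)] ?_]
        intro p hp f hf
        simp only [List.mem_singleton] at hp
        subst hp
        have := mem_fAsc (List.mem_reverse.mp hf)
        omega
      · rw [if_neg hl, List.append_nil]
    · -- position n holds a file
      rw [if_pos hc]
      rcases hE0 : eOf d low n with _ | ⟨e, E₂⟩
      · -- no empty slot available below n: the inner scan fails, nothing moves any more
        have hall : ∀ p : Int, low ≤ p → p < (n : Int) → d.getD p 0 ≠ -1 := by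
          intro p h1 h2
          exact (eOf_nil_iff d low n).mp hE0 p h1 (by omega) h2
        rw [inner_none n d low _ hlow hall]
        dsimp only
        set low' : Int := if low < (n : Int) then (n : Int) else low with hlow'
        have hlow'0 : 0 ≤ low' := by rw [hlow']; split <;> [positivity; exact hlow]
        have hlow'ge : low ≤ low' := by rw [hlow']; split <;> omega
        rw [ih d low' hlow'0]
        have h1 : eOf d low' n = [] := by
          rw [eOf_nil_iff]
          intro p hp1 hp2 hp3
          exact hall p (by omega) hp3
        have h2 : eOf d low (n + 1) = [] := by
          rw [eOf, hE0, if_neg (fun a => hc a.2)]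
          rfl
        rw [h1, h2]
        rfl
      · -- e is the first empty slot: exactly one block moves, then recurse
        obtain ⟨he1, he2, he3, he4, he5, he6⟩ := eOf_cons hE0
        rw [inner_found n d _ e low hlow he1 he3 he4
          (fun p hp1 hp2 => he5 p hp1 (by omega) hp2)]
        dsimp only
        have hget : ∀ p : Int, p ≠ (n : Int) →
            ((d.insert e (d.getD (n : Int) 0)).insert (n : Int) (-1)).getD p 0
              = if p = e then d.getD (n : Int) 0 else d.getD p 0 := by
          intro p hp
          rw [PySem.Dict.getD_insert, if_neg hp, PySem.Dict.getD_insert]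
        set d' : PySem.Dict Int Int := (d.insert e (d.getD (n : Int) 0)).insert (n : Int) (-1) with hd'def
        rw [ih d' e he2]
        -- empties of d' from e are exactly E₂
        have hE' : eOf d' e n = E₂ := by
          rw [he6]
          apply eOf_ext
          intro i hi
          rw [hget (i : Int) (by omega)]
          by_cases hie : (i : Int) = e
          · rw [if_pos hie]
            constructor
            · rintro ⟨_, hcon⟩; exact absurd hcon hc
            · rintro ⟨hcon, _⟩; omega
          · rw [if_neg hie]
            exact ⟨fun ⟨a, b⟩ => ⟨by omega, b⟩, fun ⟨a, b⟩ => ⟨by omega, b⟩⟩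
        -- files of d' below n are the files of d with (e, content) inserted in position order
        obtain ⟨A, B, hAB, hAB', hA⟩ :=
          fAsc_update (d := d) (d' := d') n he2 he3 he4 hc
            (fun p hp1 hp2 => hget p (by omega))
        rw [hE', hAB']
        have hmid : defragPair d' E₂ ((A ++ (e, d.getD (n : Int) 0) :: B).reverse)
            = defragPair d' E₂ ((fAsc d n).reverse) := by
          rw [List.reverse_append, List.reverse_cons, List.append_assoc, hAB,
            List.reverse_append]
          exact pair_skip_mid B.reverse d' E₂ A.reverse
            (fun p hp => by
              have hm := mem_eOf (p := p) (n := n) (low := e + 1) (by rw [← he6]; exact hp)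
              omega)
            (fun f hf => le_of_lt (hA f (List.mem_reverse.mp hf)))
        rw [hmid]
        -- unfold one step of the pair loop on the right-hand side
        have hEn : eOf d low (n + 1) = e :: E₂ := by
          rw [eOf, hE0, if_neg (fun a => hc a.2)]
          simp
        have hFn : (fAsc d (n + 1)).reverse
            = ((n : Int), d.getD (n : Int) 0) :: (fAsc d n).reverse := by
          rw [fAsc, if_neg hc]
          simp
        rw [hEn, hFn, defragPair, if_pos he3]

-- B's scanning fold builds exactly (eOf d 0 n, fAsc d n)
theorem scan_fold (d : PySem.Dict Int Int) (n : Nat) :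
    (PySem.List.pyRange 0 (n : Int) 1).foldl
      (fun (acc : List Int × List (Int × Int)) pos =>
        let content := d.getD pos 0
        if content = -1 then (acc.1 ++ [pos], acc.2)
        else (acc.1, acc.2 ++ [(pos, content)]))
      ([], [])
    = (eOf d 0 n, fAsc d n) := by
  induction n with
  | zero => rfl
  | succ n ih =>
    have hsplit : PySem.List.pyRange 0 (((n : Nat) + 1 : Nat) : Int) 1
        = PySem.List.pyRange 0 (n : Int) 1 ++ [(n : Int)] := by
      push_cast
      exact PySem.List.pyRange_one_succ_right (Int.natCast_nonneg n)
    rw [hsplit, List.foldl_append, ih]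
    simp only [List.foldl_cons, List.foldl_nil]
    rw [eOf, fAsc]
    by_cases hcn : d.getD (n : Int) 0 = -1
    · simp [hcn]
    · simp [hcn]

-- ===== VERDICT (by name: the statement is the Claim_ definition above) =====
theorem defrag_py_spec : Claim_equal_defrag_py := by
  intro disk_map _ _
  show defrag_py disk_map = defrag_py_alt disk_map
  show (defragOuter ⟨disk_map⟩ 0
      ((PySem.List.max? (PySem.Dict.keys ⟨disk_map⟩) (fun x => x)).getD 0 + 1).toNat).items
    = (defragPair ⟨disk_map⟩
        ((PySem.List.pyRange 0 ((PySem.List.max? (PySem.Dict.keys ⟨disk_map⟩) (fun x => x)).getD 0 + 1) 1).foldl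
          (fun (acc : List Int × List (Int × Int)) pos =>
            let content := PySem.Dict.getD ⟨disk_map⟩ pos 0
            if content = -1 then (acc.1 ++ [pos], acc.2)
            else (acc.1, acc.2 ++ [(pos, content)]))
          ([], [])).1
        ((PySem.List.pyRange 0 ((PySem.List.max? (PySem.Dict.keys ⟨disk_map⟩) (fun x => x)).getD 0 + 1) 1).foldl
          (fun (acc : List Int × List (Int × Int)) pos =>
            let content := PySem.Dict.getD ⟨disk_map⟩ pos 0
            if content = -1 then (acc.1 ++ [pos], acc.2)
            else (acc.1, acc.2 ++ [(pos, content)]))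
          ([], [])).2.reverse).items
  generalize (PySem.List.max? (PySem.Dict.keys (⟨disk_map⟩ : PySem.Dict Int Int)) (fun x => x)).getD 0 = de
  by_cases hpos : 0 ≤ de + 1
  · have hs := scan_fold ⟨disk_map⟩ (de + 1).toNat
    rw [Int.toNat_of_nonneg hpos] at hs
    rw [outer_eq_pair (de + 1).toNat ⟨disk_map⟩ 0 le_rfl, hs]
  · have h0 : (de + 1).toNat = 0 := by omega
    rw [h0, PySem.List.pyRange_one_eq_nil (show de + 1 ≤ 0 by omega)]
    rfl
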